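-- pv_equiv track=rewrite | github.com/pypi-data/pypi-mirror-401 | packages/kida-templates/kida_templates-0.1.2.tar.gz/kida_templates-0.1.2/src/kida/analysis/cache.py | _has_prefix_match
-- ===== SOURCE A (Python) =====
-- def _has_prefix_match(paths: frozenset[str], prefixes: frozenset[str]) -> bool:
--     """Check if any path starts with any prefix.
--
--     Handles both "page." (prefix) and "page" (exact match) patterns.
--
--     """
--     for path in paths:
--         for prefix in prefixes:
--             # Handle exact match (prefix without dot)
--             if prefix == path:
--                 return True
--             # Handle prefix match (prefix with dot)
--             if prefix.endswith(".") and path.startswith(prefix):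
--                 return True
--             # Handle prefix that should be dotted
--             if not prefix.endswith(".") and (path == prefix or path.startswith(prefix + ".")):
--                 return True
--     return False
-- ===== SOURCE B (Python) =====
-- def _has_prefix_match(paths, prefixes):
--     """Check if any path starts with any prefix (exact, dotted, or to-be-dotted).
--
--     One pass per path: test the path itself and, at every dot boundary i,
--     the candidates path[:i] and path[:i+1] against the prefix set.
--     """
--     prefix_set = set(prefixes)
--     for path in paths:
--         if path in prefix_set:
--             return True
--         for i, ch in enumerate(path):
--             if ch == '.' and (path[:i] in prefix_set or path[:i + 1] in prefix_set):
--                 return True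
--     return False
-- ===== Notes on version B (the rewrite author's own statement) =====
-- stated objective: faster
-- what changed: Instead of testing every (path, prefix) pair with string comparisons, B builds a hash set of prefixes once and for each path tests only its O(L) dot-boundary candidate prefixes (the path itself, and path[:i]/path[:i+1] at each dot) for set membership.
import Mathlib
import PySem

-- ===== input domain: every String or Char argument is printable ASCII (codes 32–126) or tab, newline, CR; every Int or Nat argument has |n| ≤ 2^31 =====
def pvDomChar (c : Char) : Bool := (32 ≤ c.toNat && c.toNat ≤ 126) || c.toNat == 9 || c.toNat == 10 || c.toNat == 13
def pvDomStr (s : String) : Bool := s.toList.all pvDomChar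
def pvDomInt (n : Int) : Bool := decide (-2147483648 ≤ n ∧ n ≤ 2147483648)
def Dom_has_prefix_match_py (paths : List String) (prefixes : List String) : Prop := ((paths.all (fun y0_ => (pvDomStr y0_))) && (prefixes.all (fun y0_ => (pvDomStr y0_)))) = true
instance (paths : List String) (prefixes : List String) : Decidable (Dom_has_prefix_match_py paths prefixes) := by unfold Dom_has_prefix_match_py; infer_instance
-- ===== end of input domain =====

-- B replaces A's all-pairs prefix tests by one hash-set of prefixes plus, per path,
-- membership tests of the path's dot-boundary candidate prefixes only (objective: faster).

-- ===== PORT A =====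
-- Literal port of A's nested loops with early return (= nested any).
-- 'prefix + "."' is ported as String.ofList (pre.toList ++ ['.']): exact code-point concatenation.
def has_prefix_match_py (paths : List String) (prefixes : List String) : Bool :=
  paths.any (fun path =>
    prefixes.any (fun pre =>
      pre == path ||
      (PySem.Str.endswith pre "." && PySem.Str.startswith path pre) ||
      (!(PySem.Str.endswith pre ".") &&
        (path == pre || PySem.Str.startswith path (String.ofList (pre.toList ++ ['.']))))))

-- ===== PORT B =====
-- Literal port of B: prefix_set = set(prefixes); per path test path itself and, at every
-- dot position i, path[:i] and path[:i+1]. The slice path[:i] with the nonnegative i from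
-- enumerate is exactly String.ofList (path.toList.take i.toNat) on code points.
def has_prefix_match_py_alt (paths : List String) (prefixes : List String) : Bool :=
  let pset : PySem.Set String := PySem.Set.ofList prefixes
  paths.any (fun path =>
    PySem.Set.contains pset path ||
    (PySem.List.enumerate path.toList).any (fun ic =>
      ic.2 == '.' &&
        (PySem.Set.contains pset (String.ofList (path.toList.take ic.1.toNat)) ||
         PySem.Set.contains pset (String.ofList (path.toList.take (ic.1.toNat + 1))))))

-- ===== PRECONDITION & SPEC =====
def Spec_has_prefix_match_py (paths : List String) (prefixes : List String) (out : Bool) : Prop := out = has_prefix_match_py_alt paths prefixes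
instance (paths : List String) (prefixes : List String) (out : Bool) : Decidable (Spec_has_prefix_match_py paths prefixes out) := by unfold Spec_has_prefix_match_py; infer_instance

-- ===== CLAIM (what is proved, stated in full; the proofs are below) =====
def Claim_equal_has_prefix_match_py : Prop := ∀ (paths : List String) (prefixes : List String), Dom_has_prefix_match_py paths prefixes → Spec_has_prefix_match_py paths prefixes (has_prefix_match_py paths prefixes)

-- ===== LEMMAS AND PROOFS =====

-- facts about a list split at a known character occurrence
lemma pv_getElem?_append_cons (q t : List Char) (c : Char) :
    (q ++ c :: t)[q.length]? = some c := by
  induction q with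
  | nil => rfl
  | cons a q ih => simp

lemma pv_take_append_cons (q t : List Char) (c : Char) :
    (q ++ c :: t).take q.length = q := by
  induction q with
  | nil => rfl
  | cons a q ih => simp [ih]

lemma pv_take_succ_append_cons (q t : List Char) (c : Char) :
    (q ++ c :: t).take (q.length + 1) = q ++ [c] := by
  induction q with
  | nil => rfl
  | cons a q ih => simpa using ih

-- the condition A tests for one (path, prefix) pair, characterised by dot boundaries of the path
lemma pv_condA_iff (pre path : String) :
    (pre == path ||
     (PySem.Str.endswith pre "." && PySem.Str.startswith path pre) ||
     (!(PySem.Str.endswith pre ".") &&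
       (path == pre || PySem.Str.startswith path (String.ofList (pre.toList ++ ['.']))))) = true
    ↔ (pre = path ∨ ∃ k : Nat, path.toList[k]? = some '.' ∧
        (pre.toList = path.toList.take k ∨ pre.toList = path.toList.take (k + 1))) := by
  simp only [Bool.or_eq_true, Bool.and_eq_true, Bool.not_eq_true', beq_iff_eq,
    PySem.Str.endswith_eq, PySem.Str.startswith_eq, PySem.Chars.startswith_iff,
    String.toList_ofList]
  constructor
  · rintro ((h | ⟨hdot, hpref⟩) | ⟨hnot, (h | hpref)⟩)
    · exact Or.inl h
    · -- pre ends with '.', pre is a prefix of path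
      obtain ⟨q, hq⟩ := (PySem.Chars.endswith_iff _ _).mp hdot
      obtain ⟨t, ht⟩ := hpref
      have hP : path.toList = q ++ '.' :: t := by
        rw [← ht, ← hq]; simp
      refine Or.inr ⟨q.length, ?_, Or.inr ?_⟩
      · rw [hP]; exact pv_getElem?_append_cons q t '.'
      · rw [hP, pv_take_succ_append_cons, ← hq]; rfl
    · exact Or.inl h.symm
    · -- pre + "." is a prefix of path
      obtain ⟨t, ht⟩ := hpref
      have hP : path.toList = pre.toList ++ '.' :: t := by
        rw [← ht]; simp
      refine Or.inr ⟨pre.toList.length, ?_, Or.inl ?_⟩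
      · rw [hP]; exact pv_getElem?_append_cons pre.toList t '.'
      · rw [hP, pv_take_append_cons]
  · rintro (h | ⟨k, hk, (h | h)⟩)
    · exact Or.inl (Or.inl h)
    · -- pre = path[:k], path[k] = '.'
      by_cases hdot : PySem.Chars.endswith pre.toList ".".toList = true
      · refine Or.inl (Or.inr ⟨hdot, ?_⟩)
        rw [h]; exact List.take_prefix k path.toList
      · refine Or.inr ⟨Bool.eq_false_iff.mpr hdot, Or.inr ?_⟩
        have hstep : pre.toList ++ ['.'] = path.toList.take (k + 1) := by
          rw [h, List.take_add_one, hk]; rfl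
        rw [hstep]; exact List.take_prefix (k + 1) path.toList
    · -- pre = path[:k+1], path[k] = '.': pre ends with '.' and is a prefix
      have hsplit : pre.toList = path.toList.take k ++ ['.'] := by
        rw [h, List.take_add_one, hk]; rfl
      refine Or.inl (Or.inr ⟨?_, ?_⟩)
      · exact (PySem.Chars.endswith_iff _ _).mpr ⟨path.toList.take k, hsplit.symm⟩
      · rw [h]; exact List.take_prefix (k + 1) path.toList

-- B's inner test for one path, as a proposition
lemma pv_innerB_iff (path : String) (prefixes : List String) :
    (PySem.Set.contains (PySem.Set.ofList prefixes) path ||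
     (PySem.List.enumerate path.toList).any (fun ic =>
       ic.2 == '.' &&
         (PySem.Set.contains (PySem.Set.ofList prefixes) (String.ofList (path.toList.take ic.1.toNat)) ||
          PySem.Set.contains (PySem.Set.ofList prefixes) (String.ofList (path.toList.take (ic.1.toNat + 1)))))) = true
    ↔ (path ∈ prefixes ∨ ∃ k : Nat, path.toList[k]? = some '.' ∧
        (String.ofList (path.toList.take k) ∈ prefixes ∨
         String.ofList (path.toList.take (k + 1)) ∈ prefixes)) := by
  simp only [Bool.or_eq_true, List.any_eq_true, Bool.and_eq_true, beq_iff_eq,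
    PySem.Set.contains_iff, PySem.Set.mem_ofList]
  constructor
  · rintro (h | ⟨ic, hmem, hdot, hc⟩)
    · exact Or.inl h
    · obtain ⟨k, hk, rfl⟩ := (PySem.List.mem_enumerate_iff _ _ _).mp hmem
      refine Or.inr ⟨k, ?_, by simpa using hc⟩
      rw [List.getElem?_eq_getElem hk, show path.toList[k] = '.' from hdot]
  · rintro (h | ⟨k, hk, hc⟩)
    · exact Or.inl h
    · have hlt : k < path.toList.length := by
        by_contra hge
        simp [List.getElem?_eq_none (by omega : path.toList.length ≤ k)] at hk
      refine Or.inr ⟨((0 : Int) + k, path.toList[k]), ?_, ?_, by simpa using hc⟩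
      · exact (PySem.List.mem_enumerate_iff _ _ _).mpr ⟨k, hlt, rfl⟩
      · have h2 := List.getElem?_eq_getElem hlt
        rw [h2] at hk; exact Option.some.inj hk

-- per-path equivalence of the two inner tests
lemma pv_inner_eq (path : String) (prefixes : List String) :
    prefixes.any (fun pre =>
      pre == path ||
      (PySem.Str.endswith pre "." && PySem.Str.startswith path pre) ||
      (!(PySem.Str.endswith pre ".") &&
        (path == pre || PySem.Str.startswith path (String.ofList (pre.toList ++ ['.']))))) =
    (PySem.Set.contains (PySem.Set.ofList prefixes) path ||
     (PySem.List.enumerate path.toList).any (fun ic =>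
       ic.2 == '.' &&
         (PySem.Set.contains (PySem.Set.ofList prefixes) (String.ofList (path.toList.take ic.1.toNat)) ||
          PySem.Set.contains (PySem.Set.ofList prefixes) (String.ofList (path.toList.take (ic.1.toNat + 1)))))) := by
  rw [Bool.eq_iff_iff, pv_innerB_iff, List.any_eq_true]
  constructor
  · rintro ⟨pre, hmem, hcond⟩
    rcases (pv_condA_iff pre path).mp hcond with h | ⟨k, hk, h | h⟩
    · exact Or.inl (h ▸ hmem)
    · refine Or.inr ⟨k, hk, Or.inl ?_⟩
      have : pre = String.ofList (path.toList.take k) := String.toList_inj.mp (by simpa using h)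
      exact this ▸ hmem
    · refine Or.inr ⟨k, hk, Or.inr ?_⟩
      have : pre = String.ofList (path.toList.take (k + 1)) := String.toList_inj.mp (by simpa using h)
      exact this ▸ hmem
  · rintro (h | ⟨k, hk, h | h⟩)
    · exact ⟨path, h, (pv_condA_iff path path).mpr (Or.inl rfl)⟩
    · exact ⟨_, h, (pv_condA_iff _ path).mpr (Or.inr ⟨k, hk, Or.inl (by simp)⟩)⟩
    · exact ⟨_, h, (pv_condA_iff _ path).mpr (Or.inr ⟨k, hk, Or.inr (by simp)⟩)⟩

-- ===== VERDICT (by name: the statement is the Claim_ definition above) =====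
theorem has_prefix_match_py_spec : Claim_equal_has_prefix_match_py := by
  intro paths prefixes _
  show has_prefix_match_py paths prefixes = has_prefix_match_py_alt paths prefixes
  unfold has_prefix_match_py has_prefix_match_py_alt
  simp only [pv_inner_eq]
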